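-- pv_equiv track=rewrite | github.com/naiveraider/RaiderEvolve | evolve/pacman.py | simulate_collection
-- ===== SOURCE A (Python) =====
-- def simulate_collection(
--     path: list,
--     pacman_start: tuple,
--     food_positions: list,
--     grid: list,
-- ) -> tuple:
--     """
--     Walk `path` and collect food dots.
--
--     Returns (score, steps, n_collected, success).
--       score = n_collected * 100  +  (500 if all collected)  -  steps_taken
--     Path validity is enforced: bad steps stop simulation early.
--     """
--     food_set = set(map(tuple, food_positions))
--     n_total   = len(food_set)
--     collected = 0
--
--     if not path:
--         return -1000, 0, 0, False
--
--     # Normalise to tuples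
--     path = [tuple(p) for p in path]
--
--     if path[0] != tuple(pacman_start):
--         return -500, 0, 0, False
--
--     pos = path[0]
--     steps = 0
--     for nxt in path[1:]:
--         nxt = tuple(nxt)
--         r, c = nxt
--         # out of bounds
--         if not (0 <= r < len(grid) and 0 <= c < len(grid[r])):
--             break
--         # wall
--         if grid[r][c] == "%":
--             break
--         # must be adjacent
--         if abs(r - pos[0]) + abs(c - pos[1]) != 1:
--             break
--         pos   = nxt
--         steps += 1
--         if nxt in food_set:
--             food_set.discard(nxt)
--             collected += 1
--
--     success = (len(food_set) == 0)
--     score   = collected * 100 + (500 if success else 0) - steps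
--     return score, steps, collected, success
-- ===== SOURCE B (Python) =====
-- def simulate_collection(
--     path: list,
--     pacman_start: tuple,
--     food_positions: list,
--     grid: list,
-- ) -> tuple:
--     """Staged rewrite: precompute a boolean validity list for consecutive
--     pairs, steps = index of its first False, food counted as a set
--     intersection with the valid prefix."""
--     food_set = set(map(tuple, food_positions))
--     n_total = len(food_set)
--
--     if not path:
--         return -1000, 0, 0, False
--
--     path = [tuple(p) for p in path]
--
--     if path[0] != tuple(pacman_start):
--         return -500, 0, 0, False
--
--     def ok(prev, nxt):
--         r, c = nxt
--         return (0 <= r < len(grid) and 0 <= c < len(grid[r])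
--                 and grid[r][c] != "%"
--                 and abs(r - prev[0]) + abs(c - prev[1]) == 1)
--
--     oks = [ok(p, q) for p, q in zip(path, path[1:])]
--     steps = oks.index(False) if False in oks else len(oks)
--
--     collected = len(food_set.intersection(path[1:steps + 1]))
--     success = (collected == n_total)
--     score = collected * 100 + (500 if success else 0) - steps
--     return score, steps, collected, success
-- ===== Notes on version B (the rewrite author's own statement) =====
-- stated objective: alternative
-- what changed: Replaced A's single stateful loop (mutating position, step counter, food set and collected together) by a staged pipeline: a precomputed boolean validity list over zipped consecutive pairs, steps = index of the first False in it, and collected = size of the intersection of the food set with the valid path prefix.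
import Mathlib
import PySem

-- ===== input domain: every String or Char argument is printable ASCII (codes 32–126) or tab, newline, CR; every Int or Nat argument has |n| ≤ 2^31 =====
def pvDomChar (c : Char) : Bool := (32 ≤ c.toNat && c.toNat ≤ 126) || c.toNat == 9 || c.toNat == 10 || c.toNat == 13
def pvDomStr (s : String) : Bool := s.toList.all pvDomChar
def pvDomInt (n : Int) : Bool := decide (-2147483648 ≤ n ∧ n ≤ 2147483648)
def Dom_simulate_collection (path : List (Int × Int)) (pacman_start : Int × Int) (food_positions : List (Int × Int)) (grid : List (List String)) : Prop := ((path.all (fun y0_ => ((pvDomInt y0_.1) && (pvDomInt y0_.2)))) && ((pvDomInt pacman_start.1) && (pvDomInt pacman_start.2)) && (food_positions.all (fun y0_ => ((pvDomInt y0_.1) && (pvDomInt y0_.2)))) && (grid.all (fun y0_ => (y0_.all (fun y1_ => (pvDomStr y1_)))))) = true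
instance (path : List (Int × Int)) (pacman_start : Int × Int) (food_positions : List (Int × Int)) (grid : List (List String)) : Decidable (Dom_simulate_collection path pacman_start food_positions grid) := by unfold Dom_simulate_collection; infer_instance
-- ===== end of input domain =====

-- ===== PORT A =====
-- B recomputes A's result by a staged pipeline (validity list, first-False index, set intersection); proved equal.
-- helper: the for-loop of A (breaks become returns), state = (pos, steps, food set, collected)
def aLoop (grid : List (List String)) (food : PySem.Set (Int × Int)) (pos : Int × Int)
    (steps collected : Int) : List (Int × Int) → Int × PySem.Set (Int × Int) × Int
  | [] => (steps, food, collected)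
  | nxt :: rest =>
    if !(decide (0 ≤ nxt.1) && decide (nxt.1 < (grid.length : Int)) && decide (0 ≤ nxt.2) &&
         decide (nxt.2 < ((PySem.List.pyGetD grid nxt.1 []).length : Int))) then
      (steps, food, collected)
    else if PySem.List.pyGetD (PySem.List.pyGetD grid nxt.1 []) nxt.2 "" == "%" then
      (steps, food, collected)
    else if !((nxt.1 - pos.1).natAbs + (nxt.2 - pos.2).natAbs == 1) then
      (steps, food, collected)
    else if PySem.Set.contains food nxt then
      aLoop grid (PySem.Set.discard food nxt) nxt (steps + 1) (collected + 1) rest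
    else
      aLoop grid food nxt (steps + 1) collected rest

def simulate_collection (path : List (Int × Int)) (pacman_start : Int × Int) (food_positions : List (Int × Int)) (grid : List (List String)) : Int × Int × Int × Bool :=
  let food_set := PySem.Set.ofList food_positions
  match path with
  | [] => (-1000, 0, 0, false)
  | p0 :: rest =>
    if p0 ≠ pacman_start then (-500, 0, 0, false)
    else
      let r := aLoop grid food_set p0 0 0 rest
      let success : Bool := r.2.1.length == 0
      (r.2.2 * 100 + (if success then 500 else 0) - r.1, r.1, r.2.2, success)

-- ===== PORT B =====
-- helper: B's pure move-validity test `ok(prev, nxt)` (one boolean conjunction)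
def okMove (grid : List (List String)) (prev nxt : Int × Int) : Bool :=
  decide (0 ≤ nxt.1) && decide (nxt.1 < (grid.length : Int)) && decide (0 ≤ nxt.2) &&
  decide (nxt.2 < ((PySem.List.pyGetD grid nxt.1 []).length : Int)) &&
  (PySem.List.pyGetD (PySem.List.pyGetD grid nxt.1 []) nxt.2 "" != "%") &&
  ((nxt.1 - prev.1).natAbs + (nxt.2 - prev.2).natAbs == 1)

def simulate_collection_alt (path : List (Int × Int)) (pacman_start : Int × Int) (food_positions : List (Int × Int)) (grid : List (List String)) : Int × Int × Int × Bool :=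
  let food_set := PySem.Set.ofList food_positions
  let n_total : Int := food_set.length
  match path with
  | [] => (-1000, 0, 0, false)
  | p0 :: rest =>
    if p0 ≠ pacman_start then (-500, 0, 0, false)
    else
      -- oks = [ok(p, q) for p, q in zip(path, path[1:])]
      let oks := ((p0 :: rest).zip rest).map (fun pq => okMove grid pq.1 pq.2)
      -- steps = oks.index(False) if False in oks else len(oks)
      let steps : Nat :=
        match PySem.List.index? oks false with
        | some i => i
        | none => oks.length
      -- collected = len(food_set.intersection(path[1:steps+1]))
      let collected : Int :=
        (PySem.Set.inter food_set (PySem.List.slice (p0 :: rest) (some 1) (some ((steps : Int) + 1)))).length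
      let success : Bool := collected == n_total
      (collected * 100 + (if success then 500 else 0) - (steps : Int), (steps : Int), collected, success)

-- ===== PRECONDITION & SPEC =====
def Spec_simulate_collection (path : List (Int × Int)) (pacman_start : Int × Int) (food_positions : List (Int × Int)) (grid : List (List String)) (out : Int × Int × Int × Bool) : Prop := out = simulate_collection_alt path pacman_start food_positions grid
instance (path : List (Int × Int)) (pacman_start : Int × Int) (food_positions : List (Int × Int)) (grid : List (List String)) (out : Int × Int × Int × Bool) : Decidable (Spec_simulate_collection path pacman_start food_positions grid out) := by unfold Spec_simulate_collection; infer_instance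

-- ===== CLAIM (what is proved, stated in full; the proofs are below) =====
def Claim_equal_simulate_collection : Prop := ∀ (path : List (Int × Int)) (pacman_start : Int × Int) (food_positions : List (Int × Int)) (grid : List (List String)), Dom_simulate_collection path pacman_start food_positions grid → Spec_simulate_collection path pacman_start food_positions grid (simulate_collection path pacman_start food_positions grid)

-- ===== LEMMAS AND PROOFS =====

-- ghost walk length: number of leading valid moves (proof-only helper)
def wLen (grid : List (List String)) (prev : Int × Int) : List (Int × Int) → Nat
  | [] => 0
  | nxt :: rest => if okMove grid prev nxt then wLen grid nxt rest + 1 else 0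

theorem steps_eq_wLen (grid : List (List String)) (l : List (Int × Int)) :
    ∀ (prev : Int × Int),
    (match PySem.List.index? (((prev :: l).zip l).map (fun pq => okMove grid pq.1 pq.2)) false with
     | some i => i
     | none => (((prev :: l).zip l).map (fun pq => okMove grid pq.1 pq.2)).length)
      = wLen grid prev l := by
  induction l with
  | nil => intro prev; simp [wLen, PySem.List.index?]
  | cons nxt rest ih =>
    intro prev
    have hz : (prev :: nxt :: rest).zip (nxt :: rest)
        = (prev, nxt) :: ((nxt :: rest).zip rest) := rfl
    rw [hz]
    by_cases hok : okMove grid prev nxt = true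
    · rw [List.map_cons]
      have hh : okMove grid (prev, nxt).1 (prev, nxt).2 = true := hok
      rw [hh, PySem.List.index?_cons_of_ne _ (show (true : Bool) ≠ false by simp)]
      have := ih nxt
      rcases h : PySem.List.index? (((nxt :: rest).zip rest).map (fun pq => okMove grid pq.1 pq.2)) false with _ | i
      · rw [h] at this
        rw [h]
        simp only [Option.map_none]
        simp [wLen, hok, ← this]
      · rw [h] at this
        rw [h]
        simp only [Option.map_some]
        simp [wLen, hok, ← this]
    · have hok' : okMove grid prev nxt = false := by
        cases hA : okMove grid prev nxt with
        | false => rfl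
        | true => exact absurd hA hok
      rw [List.map_cons]
      have hh : okMove grid (prev, nxt).1 (prev, nxt).2 = false := hok'
      rw [hh, PySem.List.index?_cons_self]
      simp [wLen, hok']

theorem discard_filter_not (food tk : List (Int × Int)) (nxt : Int × Int) :
    (PySem.Set.discard food nxt).filter (fun f => !(tk.contains f))
      = food.filter (fun f => !((nxt :: tk).contains f)) := by
  simp only [PySem.Set.discard, List.filter_filter]
  apply List.filter_congr
  intro a _
  by_cases h : a = nxt <;> simp [h]

theorem len_aux (tk : List (Int × Int)) (nxt : Int × Int) (fs : List (Int × Int)) :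
    fs.Nodup → nxt ∈ fs →
    (fs.filter (fun f => decide (f = nxt) || decide (f ∈ tk))).length
      = (fs.filter (fun f => decide (f ∈ tk) && !(f == nxt))).length + 1 := by
  induction fs with
  | nil => intro _ h; cases h
  | cons a fs ih =>
    intro hnd hmem
    rcases List.nodup_cons.mp hnd with ⟨hani, hndfs⟩
    by_cases h : a = nxt
    · subst h
      have h1 : fs.filter (fun f => decide (f = a) || decide (f ∈ tk))
          = fs.filter (fun f => decide (f ∈ tk)) := by
        apply List.filter_congr; intro b hb
        have : b ≠ a := fun e => hani (e ▸ hb)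
        simp [this]
      have h2 : fs.filter (fun f => decide (f ∈ tk) && !(f == a))
          = fs.filter (fun f => decide (f ∈ tk)) := by
        apply List.filter_congr; intro b hb
        have : b ≠ a := fun e => hani (e ▸ hb)
        simp [this]
      rw [List.filter_cons_of_pos (by simp), List.filter_cons_of_neg (by simp), h1, h2]
      simp
    · have hmem' : nxt ∈ fs := by
        rcases List.mem_cons.mp hmem with h' | h'
        · exact absurd h'.symm h
        · exact h'
      by_cases htk : a ∈ tk
      · rw [List.filter_cons_of_pos (by simp [htk]),
            List.filter_cons_of_pos (by simp [h, htk])]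
        simp only [List.length_cons]
        rw [ih hndfs hmem']
      · rw [List.filter_cons_of_neg (by simp [h, htk]),
            List.filter_cons_of_neg (by simp [htk])]
        exact ih hndfs hmem'

theorem length_filter_cons_contains (food tk : List (Int × Int)) (nxt : Int × Int)
    (hnd : food.Nodup) (hmem : nxt ∈ food) :
    (food.filter (fun f => ((nxt :: tk).contains f))).length
      = ((PySem.Set.discard food nxt).filter (fun f => tk.contains f)).length + 1 := by
  have e1 : food.filter (fun f => ((nxt :: tk).contains f))
      = food.filter (fun f => decide (f = nxt) || decide (f ∈ tk)) := by
    apply List.filter_congr; intro a _; simp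
  have e2 : (PySem.Set.discard food nxt).filter (fun f => tk.contains f)
      = food.filter (fun f => decide (f ∈ tk) && !(f == nxt)) := by
    simp only [PySem.Set.discard, List.filter_filter]
    apply List.filter_congr; intro a _
    simp [Bool.and_comm]
  rw [e1, e2]
  exact len_aux tk nxt food hnd hmem

theorem not_mem_filter_cons_contains (food tk : List (Int × Int)) (nxt : Int × Int)
    (hmem : nxt ∉ food) (b : Bool) :
    food.filter (fun f => ((nxt :: tk).contains f) == b)
      = food.filter (fun f => (tk.contains f) == b) := by
  apply List.filter_congr; intro a ha
  have : a ≠ nxt := fun e => hmem (e ▸ ha)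
  simp [this]

theorem aLoop_eq (grid : List (List String)) (l : List (Int × Int)) :
    ∀ (prev : Int × Int) (food : List (Int × Int)) (s k : Int), food.Nodup →
    aLoop grid food prev s k l =
      (s + (wLen grid prev l : Int),
       food.filter (fun f => !((l.take (wLen grid prev l)).contains f)),
       k + ((food.filter (fun f => ((l.take (wLen grid prev l)).contains f))).length : Int)) := by
  induction l with
  | nil => intro prev food s k _; simp [aLoop, wLen]
  | cons nxt rest ih =>
    intro prev food s k hnd
    simp only [aLoop]
    split_ifs with h1 h2 h3 hc
    · have ha : (decide (0 ≤ nxt.1) && decide (nxt.1 < (grid.length : Int)) && decide (0 ≤ nxt.2) &&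
          decide (nxt.2 < ((PySem.List.pyGetD grid nxt.1 []).length : Int))) = false := by
        cases hA : (decide (0 ≤ nxt.1) && decide (nxt.1 < (grid.length : Int)) && decide (0 ≤ nxt.2) &&
            decide (nxt.2 < ((PySem.List.pyGetD grid nxt.1 []).length : Int))) with
        | false => rfl
        | true => rw [hA] at h1; simp at h1
      have hok : okMove grid prev nxt = false := by
        simp only [okMove, ha, Bool.false_and]
      simp [wLen, hok]
    · have hok : okMove grid prev nxt = false := by
        simp only [okMove]
        simp [show PySem.List.pyGetD (PySem.List.pyGetD grid nxt.1 []) nxt.2 "" = "%" by simpa using h2]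
      simp [wLen, hok]
    · have hf : ((nxt.1 - prev.1).natAbs + (nxt.2 - prev.2).natAbs == 1) = false := by
        cases hA : ((nxt.1 - prev.1).natAbs + (nxt.2 - prev.2).natAbs == 1) with
        | false => rfl
        | true => rw [hA] at h3; simp at h3
      have hok : okMove grid prev nxt = false := by
        simp only [okMove, hf, Bool.and_false]
      simp [wLen, hok]
    · have ha : (decide (0 ≤ nxt.1) && decide (nxt.1 < (grid.length : Int)) && decide (0 ≤ nxt.2) &&
          decide (nxt.2 < ((PySem.List.pyGetD grid nxt.1 []).length : Int))) = true := by
        cases hA : (decide (0 ≤ nxt.1) && decide (nxt.1 < (grid.length : Int)) && decide (0 ≤ nxt.2) &&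
            decide (nxt.2 < ((PySem.List.pyGetD grid nxt.1 []).length : Int))) with
        | true => rfl
        | false => rw [hA] at h1; simp at h1
      have hne : PySem.List.pyGetD (PySem.List.pyGetD grid nxt.1 []) nxt.2 "" ≠ "%" := by
        simpa using h2
      have hf : (nxt.1 - prev.1).natAbs + (nxt.2 - prev.2).natAbs = 1 := by
        simpa using h3
      have hok : okMove grid prev nxt = true := by
        simp [okMove, ha, hne, hf]
      have hmem : nxt ∈ food := by simpa [PySem.Set.contains] using hc
      rw [ih nxt (PySem.Set.discard food nxt) (s + 1) (k + 1)
            (PySem.Set.nodup_discard food nxt hnd)]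
      simp only [wLen, hok, if_pos, List.take_succ_cons]
      refine Prod.ext (by push_cast; ring) (Prod.ext ?_ ?_)
      · exact discard_filter_not food (rest.take (wLen grid nxt rest)) nxt
      · rw [length_filter_cons_contains food (rest.take (wLen grid nxt rest)) nxt hnd hmem]
        push_cast; ring
    · have ha : (decide (0 ≤ nxt.1) && decide (nxt.1 < (grid.length : Int)) && decide (0 ≤ nxt.2) &&
          decide (nxt.2 < ((PySem.List.pyGetD grid nxt.1 []).length : Int))) = true := by
        cases hA : (decide (0 ≤ nxt.1) && decide (nxt.1 < (grid.length : Int)) && decide (0 ≤ nxt.2) &&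
            decide (nxt.2 < ((PySem.List.pyGetD grid nxt.1 []).length : Int))) with
        | true => rfl
        | false => rw [hA] at h1; simp at h1
      have hne : PySem.List.pyGetD (PySem.List.pyGetD grid nxt.1 []) nxt.2 "" ≠ "%" := by
        simpa using h2
      have hf : (nxt.1 - prev.1).natAbs + (nxt.2 - prev.2).natAbs = 1 := by
        simpa using h3
      have hok : okMove grid prev nxt = true := by
        simp [okMove, ha, hne, hf]
      have hmem : nxt ∉ food := fun h => hc (by simpa [PySem.Set.contains] using h)
      rw [ih nxt food (s + 1) k hnd]
      simp only [wLen, hok, if_pos, List.take_succ_cons]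
      refine Prod.ext (by push_cast; ring) (Prod.ext ?_ ?_)
      · have := not_mem_filter_cons_contains food (rest.take (wLen grid nxt rest)) nxt hmem false
        simpa using this.symm
      · have := congrArg List.length
          (not_mem_filter_cons_contains food (rest.take (wLen grid nxt rest)) nxt hmem true)
        simpa using this.symm

-- ===== VERDICT (by name: the statement is the Claim_ definition above) =====
theorem simulate_collection_spec : Claim_equal_simulate_collection := by
  unfold Claim_equal_simulate_collection
  intro path start foods grid _
  unfold Spec_simulate_collection
  cases path with
  | nil => rfl
  | cons p0 rest =>
    simp only [simulate_collection, simulate_collection_alt]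
    by_cases h : p0 ≠ start
    · simp [h]
    · simp only [h, if_false]
      rw [aLoop_eq grid rest p0 (PySem.Set.ofList foods) 0 0 (PySem.Set.nodup_ofList foods)]
      rw [steps_eq_wLen grid rest p0]
      have hslice : PySem.List.slice (p0 :: rest) (some 1)
          (some ((wLen grid p0 rest : Int) + 1)) = rest.take (wLen grid p0 rest) := by
        rw [PySem.List.slice_toNat _ (by omega) (by omega)]
        have h1 : ((1 : Int)).toNat = 1 := rfl
        have h2 : (((wLen grid p0 rest : Int) + 1)).toNat = wLen grid p0 rest + 1 := by omega
        simp [h1, h2]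
      rw [hslice]
      set n := wLen grid p0 rest
      set F := PySem.Set.ofList foods
      have hinter : PySem.Set.inter F (rest.take n)
          = F.filter (fun f => ((rest.take n).contains f)) := rfl
      rw [hinter]
      set cIn := (F.filter (fun f => ((rest.take n).contains f))).length
      have hsum : cIn + (F.filter (fun f => !((rest.take n).contains f))).length = F.length := by
        have := List.length_eq_length_filter_add (l := F) (fun f => ((rest.take n).contains f))
        simpa [cIn] using this.symm
      have hsuc : ((F.filter (fun f => !((rest.take n).contains f))).length == 0)
          = ((cIn : Int) == (F.length : Int)) := by
        rw [Bool.eq_iff_iff]; simp only [beq_iff_eq]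
        omega
      simp only [hsuc]
      simp
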